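-- pv_equiv track=rewrite | github.com/JairZhu/Backup-of-undergraduate-study-materials | 智能算法及应用/期末项目/HMM.py | train_matrix
-- ===== SOURCE A (Python) =====
-- def train_matrix(train_data,pi,A,B):
--
--     for line in train_data:
--         word_list = line.split("  ")
--         first_word = word_list[0]
--         last_word_state = 3
--         if(len(first_word) == 1):
--             pi[3] += 1
--             last_word_state = 3
--         else:
--             pi[0] += 1
--             last_word_state = 2
--         for i in range(1,len(word_list)):
--             word = word_list[i].strip()
--             length = len(word)
--             if length == 0:
--                 continue
--             elif length == 1:
--                 A[last_word_state][3] += 1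
--                 B[3][ord(word)] += 1
--                 last_word_state = 3
--             elif length == 2:
--                 A[last_word_state][0] += 1
--                 A[0][2] += 1
--                 B[0][ord(word[0])] += 1
--                 B[2][ord(word[1])] += 1
--                 last_word_state = 2
--             else:
--                 A[last_word_state][0] += 1
--                 A[0][1] += 1
--                 A[1][2] += 1
--                 A[1][1] += length - 3
--                 B[0][ord(word[0])] += 1
--                 B[2][ord(word[length - 1])] += 1
--                 for j in range(1,length - 1):
--                     B[1][ord(word[j])] += 1
--                 last_word_state = 2
--     return pi,A,B
-- ===== SOURCE B (Python) =====
-- def train_matrix(train_data, pi, A, B):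
--     for line in train_data:
--         words = line.split("  ")
--         if len(words[0]) == 1:
--             pi[3] += 1
--             last = 3
--         else:
--             pi[0] += 1
--             last = 2
--         for raw in words[1:]:
--             word = raw.strip()
--             n = len(word)
--             if n == 0:
--                 continue
--             seq = [3] if n == 1 else [0] + [1] * (n - 2) + [2]
--             A[last][seq[0]] += 1
--             for p, q in zip(seq, seq[1:]):
--                 A[p][q] += 1
--             for s, ch in zip(seq, word):
--                 B[s][ord(ch)] += 1
--             last = seq[-1]
--     return pi, A, B
-- ===== Notes on version B (the rewrite author's own statement) =====
-- stated objective: simpler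
-- what changed: B replaces A's four hard-coded per-word-length branches (with their separately spelled-out transition and emission increments) by building each word's BMES state sequence once and uniformly folding transition counts over consecutive pairs and emission counts over (state, char) pairs.
import Mathlib
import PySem

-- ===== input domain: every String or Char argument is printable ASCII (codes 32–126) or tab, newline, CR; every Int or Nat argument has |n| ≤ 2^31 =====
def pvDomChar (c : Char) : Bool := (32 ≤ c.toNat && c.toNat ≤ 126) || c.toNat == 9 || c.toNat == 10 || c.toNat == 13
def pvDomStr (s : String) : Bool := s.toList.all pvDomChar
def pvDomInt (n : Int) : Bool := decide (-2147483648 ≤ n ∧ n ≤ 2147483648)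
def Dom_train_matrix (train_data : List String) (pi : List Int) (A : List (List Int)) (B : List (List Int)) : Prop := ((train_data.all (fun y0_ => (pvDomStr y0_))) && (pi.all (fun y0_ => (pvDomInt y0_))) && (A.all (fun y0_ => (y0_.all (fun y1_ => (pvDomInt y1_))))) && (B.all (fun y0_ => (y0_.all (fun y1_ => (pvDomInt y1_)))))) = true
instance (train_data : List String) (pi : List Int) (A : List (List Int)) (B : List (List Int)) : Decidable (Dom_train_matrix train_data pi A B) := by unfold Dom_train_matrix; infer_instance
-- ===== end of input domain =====

-- B builds each word's BMES state sequence once and folds the transition/emission counters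
-- uniformly over it, replacing A's four hand-expanded per-length branches (objective: simpler).
-- Note: the Python A mutates pi, A, B in place; B performs the same mutations, and the
-- equivalence proved here is about the returned triple.


-- m[i][j] += v  (both Pythons write these in-place updates; out of range never happens inside Pre_)
def pvInc (m : List (List Int)) (i j : Nat) (v : Int) : List (List Int) :=
  m.modify i (fun r => r.modify j (· + v))

-- ===== PORT A =====
-- one word of A's inner loop: the state is (A, B, last_word_state)
def pvWordStepA (st : List (List Int) × List (List Int) × Nat) (w : List Char) :
    List (List Int) × List (List Int) × Nat :=
  let word := PySem.Chars.strip w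
  let length := word.length
  if length = 0 then st
  else if length = 1 then
    (pvInc st.1 st.2.2 3 1, pvInc st.2.1 3 (word.headD ' ').toNat 1, 3)
  else if length = 2 then
    (pvInc (pvInc st.1 st.2.2 0 1) 0 2 1,
     pvInc (pvInc st.2.1 0 (word.headD ' ').toNat 1) 2 (word.getD 1 ' ').toNat 1, 2)
  else
    let A1 := pvInc (pvInc (pvInc (pvInc st.1 st.2.2 0 1) 0 1 1) 1 2 1) 1 1 ((length : Int) - 3)
    let B1 := pvInc (pvInc st.2.1 0 (word.headD ' ').toNat 1) 2 (word.getD (length - 1) ' ').toNat 1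
    -- for j in range(1, length-1): B[1][ord(word[j])] += 1
    let B2 := ((word.drop 1).dropLast).foldl (fun b c => pvInc b 1 c.toNat 1) B1
    (A1, B2, 2)

-- one line of A's outer loop (last_word_state = 3 is immediately overwritten by both branches)
def pvLineA (st : List Int × List (List Int) × List (List Int)) (line : String) :
    List Int × List (List Int) × List (List Int) :=
  let wl := PySem.Chars.splitOn line.toList (' ' :: [' '])
  let first := wl.headD []
  let (pi1, last0) : List Int × Nat :=
    if first.length = 1 then (st.1.modify 3 (· + 1), 3) else (st.1.modify 0 (· + 1), 2)
  let r := (wl.drop 1).foldl pvWordStepA (st.2.1, st.2.2, last0)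
  (pi1, r.1, r.2.1)

def train_matrix (train_data : List String) (pi : List Int) (A : List (List Int)) (B : List (List Int)) : List Int × List (List Int) × List (List Int) :=
  train_data.foldl pvLineA (pi, A, B)

-- ===== PORT B =====
-- one word of B's inner loop: build the BMES state sequence, fold counters over it
def pvWordStepB (st : List (List Int) × List (List Int) × Nat) (raw : List Char) :
    List (List Int) × List (List Int) × Nat :=
  let word := PySem.Chars.strip raw
  let n := word.length
  if n = 0 then st
  else
    let seq : List Nat := if n = 1 then [3] else [0] ++ List.replicate (n - 2) 1 ++ [2]
    let a1 := pvInc st.1 st.2.2 (seq.headD 0) 1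
    let a2 := (seq.zip (seq.drop 1)).foldl (fun m pq => pvInc m pq.1 pq.2 1) a1
    let b1 := (seq.zip word).foldl (fun m sc => pvInc m sc.1 sc.2.toNat 1) st.2.1
    (a2, b1, seq.getLastD 0)

def pvLineB (st : List Int × List (List Int) × List (List Int)) (line : String) :
    List Int × List (List Int) × List (List Int) :=
  let wl := PySem.Chars.splitOn line.toList (' ' :: [' '])
  let (pi1, last0) : List Int × Nat :=
    if (wl.headD []).length = 1 then (st.1.modify 3 (· + 1), 3) else (st.1.modify 0 (· + 1), 2)
  let r := (wl.drop 1).foldl pvWordStepB (st.2.1, st.2.2, last0)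
  (pi1, r.1, r.2.1)

def train_matrix_alt (train_data : List String) (pi : List Int) (A : List (List Int)) (B : List (List Int)) : List Int × List (List Int) × List (List Int) :=
  train_data.foldl pvLineB (pi, A, B)

-- ===== PRECONDITION & SPEC =====
-- Pre_ requires every cell the counters may touch to exist: pi[0..3] as the first word dictates,
-- and (once some line has a nonempty later word) A with 4 rows of ≥ 4 cells and B with 4 rows of
-- ≥ 127 cells.  The shape requirement is slightly wider than strictly needed: it excludes some
-- inputs where the rows happen to be just long enough for the particular characters, on which A
-- returns and B returns the same value (see the cite in the claim).
def Pre_train_matrix (train_data : List String) (pi : List Int) (A : List (List Int)) (B : List (List Int)) : Prop :=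
  ∀ line ∈ train_data,
    (if ((PySem.Chars.splitOn line.toList (' ' :: [' '])).headD []).length = 1
       then 4 ≤ pi.length else 1 ≤ pi.length)
    ∧ ((∃ w ∈ (PySem.Chars.splitOn line.toList (' ' :: [' '])).drop 1, PySem.Chars.strip w ≠ []) →
        (4 ≤ A.length ∧ (∀ r ∈ A.take 4, 4 ≤ r.length)
          ∧ 4 ≤ B.length ∧ (∀ r ∈ B.take 4, 127 ≤ r.length)))
instance (train_data : List String) (pi : List Int) (A : List (List Int)) (B : List (List Int)) : Decidable (Pre_train_matrix train_data pi A B) := by unfold Pre_train_matrix; infer_instance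

def pvWitness_train_matrix : List String × List Int × List (List Int) × List (List Int) :=
  (["ab cd"], [0, 0, 0, 0], [], [])

def Spec_train_matrix (train_data : List String) (pi : List Int) (A : List (List Int)) (B : List (List Int)) (out : List Int × List (List Int) × List (List Int)) : Prop := out = train_matrix_alt train_data pi A B
instance (train_data : List String) (pi : List Int) (A : List (List Int)) (B : List (List Int)) (out : List Int × List (List Int) × List (List Int)) : Decidable (Spec_train_matrix train_data pi A B out) := by unfold Spec_train_matrix; infer_instance

-- ===== CLAIM (what is proved, stated in full; the proofs are below) =====
def Claim_equal_train_matrix : Prop := ∀ (train_data : List String) (pi : List Int) (A : List (List Int)) (B : List (List Int)), Dom_train_matrix train_data pi A B → Pre_train_matrix train_data pi A B → Spec_train_matrix train_data pi A B (train_matrix train_data pi A B)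

-- ===== LEMMAS AND PROOFS =====

theorem pvModify_comm {α : Type} (l : List α) (i p : Nat) (f g : α → α)
    (h : ∀ x, g (f x) = f (g x)) : (l.modify i f).modify p g = (l.modify p g).modify i f := by
  apply List.ext_getElem <;> simp [List.getElem_modify]
  intro j hj; split_ifs <;> simp_all

theorem pvModify_merge {α : Type} (l : List α) (i : Nat) (f g : α → α) :
    (l.modify i f).modify i g = l.modify i (fun x => g (f x)) := by
  apply List.ext_getElem <;> simp [List.getElem_modify]
  intro j hj; split_ifs <;> simp_all

theorem pvInc_comm (m : List (List Int)) (i j p q : Nat) (v w : Int) :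
    pvInc (pvInc m i j v) p q w = pvInc (pvInc m p q w) i j v := by
  unfold pvInc
  exact pvModify_comm _ _ _ _ _ (fun r => pvModify_comm r _ _ _ _ (fun x => by ring))

theorem pvInc_merge (m : List (List Int)) (i j : Nat) (v w : Int) :
    pvInc (pvInc m i j v) i j w = pvInc m i j (v + w) := by
  unfold pvInc
  rw [pvModify_merge]
  congr 1; funext r
  rw [pvModify_merge]
  congr 1; funext x; ring

theorem pvInc_zero (m : List (List Int)) (i j : Nat) : pvInc m i j 0 = m := by
  unfold pvInc
  apply List.ext_getElem <;> simp [List.getElem_modify]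
  intro p hp h2
  apply List.ext_getElem <;> simp [List.getElem_modify]

theorem pvFold_rep (k : Nat) (m : List (List Int)) :
    (List.replicate k ((1:Nat),(1:Nat))).foldl (fun a pq => pvInc a pq.1 pq.2 1) m
      = pvInc m 1 1 (k : Int) := by
  induction k generalizing m with
  | zero =>
      simp only [List.replicate, List.foldl_nil, Int.natCast_zero, pvInc_zero]
  | succ k ih =>
      rw [List.replicate_succ, List.foldl_cons, ih, pvInc_merge]
      norm_num
      ring_nf

theorem pvFold_emit_comm (l : List Char) (m : List (List Int)) (i j : Nat) (v : Int) :
    l.foldl (fun b c => pvInc b 1 c.toNat 1) (pvInc m i j v)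
      = pvInc (l.foldl (fun b c => pvInc b 1 c.toNat 1) m) i j v := by
  induction l generalizing m with
  | nil => rfl
  | cons c l ih => simp only [List.foldl_cons, pvInc_comm _ i j, ih]

theorem pvZip_tail (k : Nat) :
    (List.replicate (k+1) (1:Nat) ++ [2]).zip (List.replicate k (1:Nat) ++ [2])
      = List.replicate k ((1:Nat),(1:Nat)) ++ [(1,2)] := by
  induction k with
  | zero => rfl
  | succ k ih => simp [List.replicate_succ] at ih ⊢; exact ih

theorem pvZip_rep (l : List Char) :
    (List.replicate l.length (1:Nat)).zip l = l.map (fun c => ((1:Nat), c)) := by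
  induction l with
  | nil => rfl
  | cons c l ih => simp [List.replicate_succ, ih]

theorem pvSeqA (k : Nat) (M : List (List Int)) (last : Nat) :
    List.foldl (fun m pq => pvInc m pq.1 pq.2 1)
      (pvInc M last ((0 :: (List.replicate (k+1) (1:Nat) ++ [2])).headD 0) 1)
      ((0 :: (List.replicate (k+1) (1:Nat) ++ [2])).zip
        (List.drop 1 (0 :: (List.replicate (k+1) (1:Nat) ++ [2]))))
    = pvInc (pvInc (pvInc (pvInc M last 0 1) 0 1 1) 1 2 1) 1 1 (k : Int) := by
  have hX : List.replicate (k+1) (1:Nat) ++ [2] = 1 :: (List.replicate k 1 ++ [2]) := by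
    simp [List.replicate_succ]
  rw [List.drop_succ_cons, List.drop_zero]
  rw [hX, List.zip_cons_cons, ← hX, pvZip_tail, List.headD_cons, List.foldl_cons,
      List.foldl_append, pvFold_rep]
  simp only [List.foldl_cons, List.foldl_nil]
  rw [pvInc_comm]

theorem pvSeqB (k : Nat) (mid : List Char) (hk : mid.length = k) (c0 cl : Char)
    (M : List (List Int)) :
    List.foldl (fun m sc => pvInc m sc.1 sc.2.toNat 1) M
      ((0 :: (List.replicate k (1:Nat) ++ [2])).zip (c0 :: (mid ++ [cl])))
    = pvInc (List.foldl (fun b c => pvInc b 1 c.toNat 1) (pvInc M 0 c0.toNat 1) mid)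
        2 cl.toNat 1 := by
  subst hk
  rw [List.zip_cons_cons, List.zip_append (by simp), pvZip_rep, List.foldl_cons,
      List.foldl_append, List.foldl_map]
  simp only [List.zip_cons_cons, List.zip_nil_right, List.foldl_cons, List.foldl_nil]

theorem pvStep_eq (st : List (List Int) × List (List Int) × Nat) (w : List Char) :
    pvWordStepA st w = pvWordStepB st w := by
  obtain ⟨Am, Bm, last⟩ := st
  simp only [pvWordStepA, pvWordStepB]
  generalize PySem.Chars.strip w = word
  match word with
  | [] => rfl
  | [c] => rfl
  | [c, d] => rfl
  | c0 :: c1 :: c2 :: t3 =>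
    obtain ⟨mid, cl, hm⟩ : ∃ mid cl, c1 :: c2 :: t3 = mid ++ [cl] := by
      rcases List.eq_nil_or_concat (c1 :: c2 :: t3) with h | ⟨l', b, h⟩
      · simp at h
      · exact ⟨l', b, by simpa [List.concat_eq_append] using h⟩
    have hmidlen : mid.length = t3.length + 1 := by
      have := congrArg List.length hm; simp at this; omega
    rw [hm]
    simp only [List.length_cons, List.length_append]
    rw [if_neg (by omega), if_neg (by omega), if_neg (by omega), if_neg (by omega),
        if_neg (by omega)]
    simp only [List.length_nil, Nat.zero_add]
    rw [show mid.length + 1 + 1 - 2 = t3.length + 1 from by omega,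
        show mid.length + 1 + 1 - 1 = mid.length + 1 from by omega,
        show ((mid.length + 1 + 1 : Nat) : Int) - 3 = (t3.length : Int) from by
          push_cast; omega]
    rw [show ([0] ++ List.replicate (t3.length+1) (1:Nat) ++ [2])
          = 0 :: (List.replicate (t3.length+1) (1:Nat) ++ [2]) from rfl]
    rw [pvSeqA, pvSeqB (t3.length+1) mid hmidlen]
    rw [List.headD_cons,
        show (c0 :: (mid ++ [cl])).getD (mid.length + 1) ' ' = cl from by
          rw [List.getD_eq_getElem _ _ (by simp)]
          simp,
        List.drop_succ_cons, List.drop_zero, List.dropLast_concat]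
    rw [show (0 :: (List.replicate (t3.length+1) (1:Nat) ++ [2])).getLastD 0 = 2 from by
          rw [show (0 :: (List.replicate (t3.length+1) (1:Nat) ++ [2]))
                = (0 :: List.replicate (t3.length+1) (1:Nat)) ++ [2] from by simp,
              List.getLastD_concat]]
    rw [pvFold_emit_comm]

theorem pvLine_eq : pvLineA = pvLineB := by
  funext st line
  have h : pvWordStepA = pvWordStepB := funext fun st => funext (pvStep_eq st)
  simp only [pvLineA, pvLineB, h]

-- ===== VERDICT (by name: the statement is the Claim_ definition above) =====
theorem train_matrix_spec : Claim_equal_train_matrix := by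
  intro td pi A B _ _
  unfold Spec_train_matrix train_matrix train_matrix_alt
  rw [pvLine_eq]
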